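-- pv_equiv track=rewrite | github.com/Pranav8692903905/FINAL2.0 | FINAL1.0-main/backend/src/helper.py | detect_skill_gaps
-- ===== SOURCE A (Python) =====
-- from typing import List, Tuple
--
-- def detect_skill_gaps(tokens: List[str]) -> str:
--     """Detect skill gaps across various tech domains"""
--     buckets = {
--         "frontend": {"react", "vue", "angular", "html", "css", "javascript", "typescript"},
--         "backend": {"node", "nodejs", "express", "django", "flask", "fastapi", "spring"},
--         "database": {"sql", "mongodb", "postgresql", "mysql", "redis", "nosql"},
--         "cloud": {"aws", "azure", "gcp", "docker", "kubernetes"},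
--         "mlops": {"mlops", "kubeflow", "mlflow", "airflow", "prefect"},
--         "llm": {"llm", "rag", "langchain", "llamaindex", "openai"},
--         "devops": {"ci/cd", "jenkins", "github", "gitlab", "devops", "git"},
--         "testing": {"testing", "jest", "pytest", "selenium", "cypress"},
--     }
--
--     missing = []
--     token_set = set(tokens)
--
--     for label, keywords in buckets.items():
--         if token_set.isdisjoint(keywords):
--             missing.append(label)
--
--     if not missing:
--         return "Strong technical profile with good coverage across key areas."
--
--     if len(missing) > 5:
--         return "Consider building broader technical skills across frontend, backend, and DevOps."
--
--     readable = {
--         "frontend": "Frontend frameworks (React/Vue/Angular)",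
--         "backend": "Backend frameworks (Node/Django/FastAPI)",
--         "database": "Database technologies (SQL/MongoDB)",
--         "cloud": "Cloud platforms (AWS/Azure/Docker)",
--         "mlops": "MLOps tooling (Kubeflow/MLflow/Airflow)",
--         "llm": "LLM development (RAG/LangChain)",
--         "devops": "DevOps and CI/CD (Git/Jenkins/GitHub Actions)",
--         "testing": "Testing frameworks (Jest/Pytest/Cypress)",
--     }
--     parts = [readable[m] for m in missing if m in readable]
--     return "Skills to consider adding: " + "; ".join(parts[:3])  # Limit to top 3
-- ===== SOURCE B (Python) =====
-- from typing import List
--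
-- def detect_skill_gaps(tokens: List[str]) -> str:
--     """Detect skill gaps via a keyword->bucket-index map and a boolean coverage array."""
--     groups = [
--         ["react", "vue", "angular", "html", "css", "javascript", "typescript"],
--         ["node", "nodejs", "express", "django", "flask", "fastapi", "spring"],
--         ["sql", "mongodb", "postgresql", "mysql", "redis", "nosql"],
--         ["aws", "azure", "gcp", "docker", "kubernetes"],
--         ["mlops", "kubeflow", "mlflow", "airflow", "prefect"],
--         ["llm", "rag", "langchain", "llamaindex", "openai"],
--         ["ci/cd", "jenkins", "github", "gitlab", "devops", "git"],
--         ["testing", "jest", "pytest", "selenium", "cypress"],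
--     ]
--     descs = [
--         "Frontend frameworks (React/Vue/Angular)",
--         "Backend frameworks (Node/Django/FastAPI)",
--         "Database technologies (SQL/MongoDB)",
--         "Cloud platforms (AWS/Azure/Docker)",
--         "MLOps tooling (Kubeflow/MLflow/Airflow)",
--         "LLM development (RAG/LangChain)",
--         "DevOps and CI/CD (Git/Jenkins/GitHub Actions)",
--         "Testing frameworks (Jest/Pytest/Cypress)",
--     ]
--     index = {kw: i for i, kws in enumerate(groups) for kw in kws}
--
--     covered = [False] * len(groups)
--     for t in tokens:
--         i = index.get(t)
--         if i is not None:
--             covered[i] = True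
--
--     missing = [d for hit, d in zip(covered, descs) if not hit]
--     if not missing:
--         return "Strong technical profile with good coverage across key areas."
--     if len(missing) > 5:
--         return "Consider building broader technical skills across frontend, backend, and DevOps."
--     return "Skills to consider adding: " + "; ".join(missing[:3])
-- ===== Notes on version B (the rewrite author's own statement) =====
-- stated objective: alternative
-- what changed: Replaces A's per-bucket set-disjointness scans and label-keyed readable dict by a keyword-to-bucket-index map, a boolean coverage array filled in one pass over the tokens, and a zip of that array with the description list; bucket labels disappear entirely.
import Mathlib
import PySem

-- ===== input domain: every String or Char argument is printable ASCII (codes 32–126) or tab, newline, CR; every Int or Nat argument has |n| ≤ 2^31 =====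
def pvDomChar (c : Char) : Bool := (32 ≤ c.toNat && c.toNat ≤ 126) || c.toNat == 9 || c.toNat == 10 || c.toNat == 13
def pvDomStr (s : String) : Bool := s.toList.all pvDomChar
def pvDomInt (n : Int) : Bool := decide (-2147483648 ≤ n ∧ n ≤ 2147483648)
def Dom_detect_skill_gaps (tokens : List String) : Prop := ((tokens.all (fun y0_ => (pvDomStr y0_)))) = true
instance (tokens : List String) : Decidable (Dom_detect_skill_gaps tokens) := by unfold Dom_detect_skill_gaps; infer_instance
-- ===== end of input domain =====

-- B replaces A's per-bucket set-disjointness scans and label-keyed lookups by a keyword→bucket-index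
-- map, a boolean coverage array filled in one pass over the tokens, and a zip with the descriptions
-- (labels disappear); same result.

-- ===== PORT A =====
-- A's buckets dict: label → keyword set (the sets are only tested for disjointness, so a keyword list is membership-exact)
def pvBucketsA : List (String × List String) :=
  [("frontend", ["react", "vue", "angular", "html", "css", "javascript", "typescript"]),
   ("backend", ["node", "nodejs", "express", "django", "flask", "fastapi", "spring"]),
   ("database", ["sql", "mongodb", "postgresql", "mysql", "redis", "nosql"]),
   ("cloud", ["aws", "azure", "gcp", "docker", "kubernetes"]),
   ("mlops", ["mlops", "kubeflow", "mlflow", "airflow", "prefect"]),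
   ("llm", ["llm", "rag", "langchain", "llamaindex", "openai"]),
   ("devops", ["ci/cd", "jenkins", "github", "gitlab", "devops", "git"]),
   ("testing", ["testing", "jest", "pytest", "selenium", "cypress"])]

def pvReadableA : PySem.Dict String String :=
  PySem.Dict.ofList
    [("frontend", "Frontend frameworks (React/Vue/Angular)"),
     ("backend", "Backend frameworks (Node/Django/FastAPI)"),
     ("database", "Database technologies (SQL/MongoDB)"),
     ("cloud", "Cloud platforms (AWS/Azure/Docker)"),
     ("mlops", "MLOps tooling (Kubeflow/MLflow/Airflow)"),
     ("llm", "LLM development (RAG/LangChain)"),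
     ("devops", "DevOps and CI/CD (Git/Jenkins/GitHub Actions)"),
     ("testing", "Testing frameworks (Jest/Pytest/Cypress)")]

def detect_skill_gaps (tokens : List String) : String :=
  let tokenSet : PySem.Set String := PySem.Set.ofList tokens
  -- for label, keywords in buckets.items(): if token_set.isdisjoint(keywords): missing.append(label)
  let missing : List String :=
    pvBucketsA.foldl (fun acc lk => if PySem.Set.isdisjoint tokenSet lk.2 then acc ++ [lk.1] else acc) []
  if missing = [] then "Strong technical profile with good coverage across key areas."
  else if 5 < PySem.List.len missing then
    "Consider building broader technical skills across frontend, backend, and DevOps."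
  else
    -- parts = [readable[m] for m in missing if m in readable]
    let parts : List String :=
      missing.foldl (fun acc m => match pvReadableA.get? m with | some r => acc ++ [r] | none => acc) []
    "Skills to consider adding: " ++ PySem.Str.join "; " (PySem.List.slice parts none (some 3))

-- ===== PORT B =====
def pvGroups : List (List String) :=
  [["react", "vue", "angular", "html", "css", "javascript", "typescript"],
   ["node", "nodejs", "express", "django", "flask", "fastapi", "spring"],
   ["sql", "mongodb", "postgresql", "mysql", "redis", "nosql"],
   ["aws", "azure", "gcp", "docker", "kubernetes"],
   ["mlops", "kubeflow", "mlflow", "airflow", "prefect"],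
   ["llm", "rag", "langchain", "llamaindex", "openai"],
   ["ci/cd", "jenkins", "github", "gitlab", "devops", "git"],
   ["testing", "jest", "pytest", "selenium", "cypress"]]

def pvDescs : List String :=
  ["Frontend frameworks (React/Vue/Angular)",
   "Backend frameworks (Node/Django/FastAPI)",
   "Database technologies (SQL/MongoDB)",
   "Cloud platforms (AWS/Azure/Docker)",
   "MLOps tooling (Kubeflow/MLflow/Airflow)",
   "LLM development (RAG/LangChain)",
   "DevOps and CI/CD (Git/Jenkins/GitHub Actions)",
   "Testing frameworks (Jest/Pytest/Cypress)"]

-- index = {kw: i for i, kws in enumerate(groups) for kw in kws}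
-- (the indices produced by enumerate are the literals 0..7, all ≥ 0, so Nat via .toNat is exact)
def pvIndex : PySem.Dict String Nat :=
  PySem.Dict.ofList
    ((PySem.List.enumerate pvGroups).flatMap (fun ik => ik.2.map (fun kw => (kw, ik.1.toNat))))

def detect_skill_gaps_alt (tokens : List String) : String :=
  -- covered = [False]*len(groups); for t in tokens: i = index.get(t); if i is not None: covered[i] = True
  -- (covered[i] = True with the in-range index i ≥ 0 is exactly List.set i true)
  let covered : List Bool :=
    tokens.foldl
      (fun cov t => match pvIndex.get? t with | some i => cov.set i true | none => cov)
      (List.replicate pvGroups.length false)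
  -- missing = [d for hit, d in zip(covered, descs) if not hit]
  let missing : List String := ((covered.zip pvDescs).filter (fun hd => !hd.1)).map Prod.snd
  if missing = [] then "Strong technical profile with good coverage across key areas."
  else if 5 < PySem.List.len missing then
    "Consider building broader technical skills across frontend, backend, and DevOps."
  else
    "Skills to consider adding: " ++ PySem.Str.join "; " (PySem.List.slice missing none (some 3))

-- ===== PRECONDITION & SPEC =====
def Spec_detect_skill_gaps (tokens : List String) (out : String) : Prop := out = detect_skill_gaps_alt tokens
instance (tokens : List String) (out : String) : Decidable (Spec_detect_skill_gaps tokens out) := by unfold Spec_detect_skill_gaps; infer_instance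

-- ===== CLAIM (what is proved, stated in full; the proofs are below) =====
def Claim_equal_detect_skill_gaps : Prop := ∀ (tokens : List String), Dom_detect_skill_gaps tokens → Spec_detect_skill_gaps tokens (detect_skill_gaps tokens)

-- ===== LEMMAS AND PROOFS =====

-- "some token hits bucket j"
def pvHit (tokens : List String) (j : Nat) : Bool :=
  tokens.any (fun t => pvIndex.get? t == some j)

set_option maxRecDepth 8192 in
lemma pvIndex_keys_nodup : pvIndex.keys.Nodup := by decide

set_option maxRecDepth 8192 in
lemma pvIndex_vals_lt : ∀ p ∈ pvIndex.items, p.2 < 8 := by decide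

lemma idx_lt {t : String} {i : Nat} (h : pvIndex.get? t = some i) : i < 8 :=
  pvIndex_vals_lt (t, i) (PySem.Dict.mem_items_of_get?_eq_some pvIndex h)

-- the fold updating the coverage array, pointwise
lemma fold_getD (j : Nat) :
    ∀ (tokens : List String) (cov : List Bool), cov.length = 8 →
      (tokens.foldl
        (fun cov t => match pvIndex.get? t with | some i => cov.set i true | none => cov) cov).getD j false
      = (cov.getD j false || pvHit tokens j) := by
  intro tokens
  induction tokens with
  | nil => intro cov _; simp [pvHit]
  | cons x xs ih =>
    intro cov hlen
    simp only [List.foldl_cons]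
    cases h : pvIndex.get? x with
    | none =>
      rw [ih cov hlen]
      simp [pvHit, h]
    | some i =>
      have hi : i < 8 := idx_lt h
      rw [ih (cov.set i true) (by simp [hlen])]
      by_cases hij : i = j
      · subst hij
        have hset : (cov.set i true).getD i false = true := by
          simp [List.getD, hlen ▸ hi]
        rw [hset]
        simp [pvHit, h]
      · have hset : (cov.set i true).getD j false = cov.getD j false := by
          simp [List.getD, List.getElem?_set_ne hij]
        rw [hset]
        have hij' : (i == j) = false := by simp [hij]
        simp [pvHit, h, hij']

-- the fold preserves the array length
lemma fold_length :
    ∀ (tokens : List String) (cov : List Bool),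
      (tokens.foldl
        (fun cov t => match pvIndex.get? t with | some i => cov.set i true | none => cov) cov).length
      = cov.length := by
  intro tokens
  induction tokens with
  | nil => intro cov; rfl
  | cons x xs ih =>
    intro cov
    simp only [List.foldl_cons]
    cases h : pvIndex.get? x <;> simp [ih]

-- a Bool list of length 8 is the literal list of its entries
lemma list_eq_of_len8 (l : List Bool) (h : l.length = 8) :
    l = [l.getD 0 false, l.getD 1 false, l.getD 2 false, l.getD 3 false,
         l.getD 4 false, l.getD 5 false, l.getD 6 false, l.getD 7 false] := by
  match l, h with
  | [a, b, c, d, e, f, g, k], _ => simp [List.getD]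

-- the coverage array, in closed form
lemma covered_eq (tokens : List String) :
    tokens.foldl
      (fun cov t => match pvIndex.get? t with | some i => cov.set i true | none => cov)
      (List.replicate pvGroups.length false)
    = [pvHit tokens 0, pvHit tokens 1, pvHit tokens 2, pvHit tokens 3,
       pvHit tokens 4, pvHit tokens 5, pvHit tokens 6, pvHit tokens 7] := by
  have h8 : (List.replicate pvGroups.length false).length = 8 := by decide
  have hlen := (fold_length tokens (List.replicate pvGroups.length false)).trans h8
  rw [list_eq_of_len8 _ hlen]
  rw [fold_getD 0 tokens _ h8, fold_getD 1 tokens _ h8, fold_getD 2 tokens _ h8,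
      fold_getD 3 tokens _ h8, fold_getD 4 tokens _ h8, fold_getD 5 tokens _ h8,
      fold_getD 6 tokens _ h8, fold_getD 7 tokens _ h8]
  simp [pvGroups, List.getD]

set_option maxRecDepth 8192 in
lemma pvIndex_items :
    pvIndex.items
      = (PySem.List.enumerate pvGroups).flatMap (fun ik => ik.2.map (fun kw => (kw, ik.1.toNat))) := by
  decide

-- proof-only pairing of bucket indices with their keyword lists
def pvJB : List (Nat × List String) :=
  [(0, ["react", "vue", "angular", "html", "css", "javascript", "typescript"]),
   (1, ["node", "nodejs", "express", "django", "flask", "fastapi", "spring"]),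
   (2, ["sql", "mongodb", "postgresql", "mysql", "redis", "nosql"]),
   (3, ["aws", "azure", "gcp", "docker", "kubernetes"]),
   (4, ["mlops", "kubeflow", "mlflow", "airflow", "prefect"]),
   (5, ["llm", "rag", "langchain", "llamaindex", "openai"]),
   (6, ["ci/cd", "jenkins", "github", "gitlab", "devops", "git"]),
   (7, ["testing", "jest", "pytest", "selenium", "cypress"])]

lemma idx_iff (t : String) (j : Nat) (kws : List String) (h : (j, kws) ∈ pvJB) :
    pvIndex.get? t = some j ↔ t ∈ kws := by
  rw [PySem.Dict.get?_eq_some_iff_mem_items pvIndex t j pvIndex_keys_nodup, pvIndex_items]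
  fin_cases h <;> simp [pvGroups, PySem.List.enumerate, Prod.ext_iff]

-- per bucket: A's disjointness test equals B's "bucket not hit" test
lemma cond_eq (tokens : List String) (j : Nat) (kws : List String) (h : (j, kws) ∈ pvJB) :
    PySem.Set.isdisjoint (PySem.Set.ofList tokens) kws = !(pvHit tokens j) := by
  rw [Bool.eq_iff_iff, PySem.Set.isdisjoint_iff, Bool.not_eq_true']
  rw [← Bool.not_eq_true (pvHit tokens j)]
  unfold pvHit
  rw [List.any_eq_true]
  constructor
  · intro hall hex
    obtain ⟨tk, htk, hg⟩ := hex
    exact hall tk (by simpa [PySem.Set.mem_ofList] using htk)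
      ((idx_iff tk j kws h).mp (by simpa using hg))
  · intro hnex x hx hxk
    exact hnex ⟨x, by simpa [PySem.Set.mem_ofList] using hx, by simpa using (idx_iff x j kws h).mpr hxk⟩

-- ===== VERDICT (by name: the statement is the Claim_ definition above) =====
set_option maxHeartbeats 2000000 in
theorem detect_skill_gaps_spec : Claim_equal_detect_skill_gaps := by
  intro tokens _
  show detect_skill_gaps tokens = detect_skill_gaps_alt tokens
  have h0 := cond_eq tokens 0 _ (by decide : ((0 : Nat), ["react", "vue", "angular", "html", "css", "javascript", "typescript"]) ∈ pvJB)
  have h1 := cond_eq tokens 1 _ (by decide : ((1 : Nat), ["node", "nodejs", "express", "django", "flask", "fastapi", "spring"]) ∈ pvJB)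
  have h2 := cond_eq tokens 2 _ (by decide : ((2 : Nat), ["sql", "mongodb", "postgresql", "mysql", "redis", "nosql"]) ∈ pvJB)
  have h3 := cond_eq tokens 3 _ (by decide : ((3 : Nat), ["aws", "azure", "gcp", "docker", "kubernetes"]) ∈ pvJB)
  have h4 := cond_eq tokens 4 _ (by decide : ((4 : Nat), ["mlops", "kubeflow", "mlflow", "airflow", "prefect"]) ∈ pvJB)
  have h5 := cond_eq tokens 5 _ (by decide : ((5 : Nat), ["llm", "rag", "langchain", "llamaindex", "openai"]) ∈ pvJB)
  have h6 := cond_eq tokens 6 _ (by decide : ((6 : Nat), ["ci/cd", "jenkins", "github", "gitlab", "devops", "git"]) ∈ pvJB)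
  have h7 := cond_eq tokens 7 _ (by decide : ((7 : Nat), ["testing", "jest", "pytest", "selenium", "cypress"]) ∈ pvJB)
  simp only [detect_skill_gaps, detect_skill_gaps_alt, covered_eq, PySem.List.foldl_append_if,
    List.nil_append, pvBucketsA, List.filter_cons, List.filter_nil, h0, h1, h2, h3, h4, h5, h6, h7]
  generalize pvHit tokens 0 = b0
  generalize pvHit tokens 1 = b1
  generalize pvHit tokens 2 = b2
  generalize pvHit tokens 3 = b3
  generalize pvHit tokens 4 = b4
  generalize pvHit tokens 5 = b5
  generalize pvHit tokens 6 = b6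
  generalize pvHit tokens 7 = b7
  revert b0 b1 b2 b3 b4 b5 b6 b7
  decide
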